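-- pv_equiv track=rewrite | github.com/Sandstorm831/sage | src/sage/algebras/lie_algebras/free_lie_algebra.py | is_lyndon
-- ===== SOURCE A (Python) =====
-- def is_lyndon(w):
--     """
--     Modified form of ``Word(w).is_lyndon()`` which uses the default order
--     (this will either be the natural integer order or lex order) and assumes
--     the input ``w`` behaves like a nonempty list.
--     This function here is designed for speed.
--
--     EXAMPLES::
--
--         sage: from sage.algebras.lie_algebras.free_lie_algebra import is_lyndon
--         sage: is_lyndon([1])
--         True
--         sage: is_lyndon([1,3,1])
--         False
--         sage: is_lyndon((2,2,3))
--         True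
--         sage: all(is_lyndon(x) for x in LyndonWords(3, 5))
--         True
--         sage: all(is_lyndon(x) for x in LyndonWords(6, 4))
--         True
--     """
--     i = 0
--     for let in w[1:]:
--         if w[i] < let:
--             i = 0
--         elif w[i] == let:
--             i += 1
--         else:
--             # we found the first word in the Lyndon factorization.
--             return False
--     return i == 0
-- ===== SOURCE B (Python) =====
-- def is_lyndon(w):
--     # Direct definition: w is Lyndon iff it is strictly smaller than
--     # every proper suffix of itself.
--     for i in range(1, len(w)):
--         if not w < w[i:]:
--             return False
--     return True
-- ===== Notes on version B (the rewrite author's own statement) =====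
-- stated objective: simpler
-- what changed: Replaces the single-pass Duval-style border-tracking scan with the textbook definition: the word must compare lexicographically smaller than each of its proper suffixes.
import Mathlib
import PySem

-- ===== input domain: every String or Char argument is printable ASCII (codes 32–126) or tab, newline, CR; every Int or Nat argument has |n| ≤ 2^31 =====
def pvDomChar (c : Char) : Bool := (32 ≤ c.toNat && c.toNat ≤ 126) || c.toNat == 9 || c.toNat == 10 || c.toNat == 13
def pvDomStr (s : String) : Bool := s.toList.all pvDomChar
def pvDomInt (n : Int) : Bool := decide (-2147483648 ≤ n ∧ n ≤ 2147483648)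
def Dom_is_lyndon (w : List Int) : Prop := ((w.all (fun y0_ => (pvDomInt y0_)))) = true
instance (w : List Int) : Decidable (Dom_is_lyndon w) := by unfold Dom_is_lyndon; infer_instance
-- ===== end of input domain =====

-- B replaces A's single-pass border-tracking (Duval-style) scan by the textbook
-- definition of a Lyndon word: strictly smaller than each proper suffix (simpler, not faster).

-- ===== PORT A =====
-- A's loop over w[1:] with the border counter i; the `none` arm of pyGet? is
-- unreachable (i always stays below the current position, so w[i] never raises).
def lyndonLoopA (w : List Int) : List Int → Int → Bool
  | [], i => i == 0
  | c :: rest, i =>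
    match PySem.List.pyGet? w i with
    | none => false
    | some wi =>
      if wi < c then lyndonLoopA w rest 0
      else if wi == c then lyndonLoopA w rest (i + 1)
      else false

def is_lyndon (w : List Int) : Bool := lyndonLoopA w (PySem.List.slice w (some 1) none) 0

-- ===== PORT B =====
-- Python's `<` on lists of ints, element by element with the shorter-prefix rule (exact).
def pyLtInt : List Int → List Int → Bool
  | _, [] => false
  | [], _ :: _ => true
  | a :: as, b :: bs => if a < b then true else if b < a then false else pyLtInt as bs

def altLoopB (w : List Int) : List Int → Bool
  | [] => true
  | i :: rest =>
    if pyLtInt w (PySem.List.slice w (some i) none) then altLoopB w rest else false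

def is_lyndon_alt (w : List Int) : Bool :=
  altLoopB w (PySem.List.pyRange 1 (w.length : Int) 1)

-- ===== PRECONDITION & SPEC =====
def Spec_is_lyndon (w : List Int) (out : Bool) : Prop := out = is_lyndon_alt w
instance (w : List Int) (out : Bool) : Decidable (Spec_is_lyndon w out) := by unfold Spec_is_lyndon; infer_instance

-- ===== CLAIM (what is proved, stated in full; the proofs are below) =====
def Claim_equal_is_lyndon : Prop := ∀ (w : List Int), Dom_is_lyndon w → Spec_is_lyndon w (is_lyndon w)

-- ===== LEMMAS AND PROOFS =====

-- "w is a Lyndon word (or empty/singleton)": strictly smaller than every proper suffix.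
def Lyn (w : List Int) : Prop :=
  ∀ s : Nat, 1 ≤ s → s < w.length → pyLtInt w (w.drop s) = true

-- w has period m on the prefix [0, j)
def Per (w : List Int) (m j : Nat) : Prop :=
  ∀ t : Nat, m ≤ t → t < j → w.getD t 0 = w.getD (t - m) 0

theorem gd_drop (w : List Int) (s t : Nat) : (w.drop s).getD t 0 = w.getD (s + t) 0 := by
  simp [List.getD, List.getElem?_drop]

theorem gd_take (w : List Int) (k t : Nat) (h : t < k) : (w.take k).getD t 0 = w.getD t 0 := by
  simp [List.getD, h]

theorem pyLt_intro (x y : List Int) (d : Nat) (hx : d < x.length) (hy : d < y.length)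
    (he : ∀ t, t < d → x.getD t 0 = y.getD t 0) (hlt : x.getD d 0 < y.getD d 0) :
    pyLtInt x y = true := by
  induction d generalizing x y with
  | zero =>
    cases x with
    | nil => simp at hx
    | cons a as =>
      cases y with
      | nil => simp at hy
      | cons b bs =>
        simp [List.getD] at hlt
        simp [pyLtInt, hlt]
  | succ d ih =>
    cases x with
    | nil => simp at hx
    | cons a as =>
      cases y with
      | nil => simp at hy
      | cons b bs =>
        have hab : a = b := by simpa [List.getD] using he 0 (by omega)
        subst hab
        simp only [pyLtInt, lt_irrefl, if_false]
        exact ih as bs (by simpa using hx) (by simpa using hy)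
          (fun t ht => by simpa [List.getD] using he (t + 1) (by omega))
          (by simpa [List.getD] using hlt)

theorem pyLt_false_of_le (x y : List Int) (hlen : y.length ≤ x.length)
    (he : ∀ t, t < y.length → x.getD t 0 = y.getD t 0) : pyLtInt x y = false := by
  induction y generalizing x with
  | nil => cases x <;> rfl
  | cons b bs ih =>
    cases x with
    | nil => simp at hlen
    | cons a as =>
      have hab : a = b := by simpa [List.getD] using he 0 (by simp)
      subst hab
      simp only [pyLtInt, lt_irrefl, if_false]
      exact ih as (by simpa using hlen)
        (fun t ht => by simpa [List.getD] using he (t + 1) (by simpa using ht))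

theorem pyLt_false_of_gt (x y : List Int) (d : Nat) (hx : d < x.length) (hy : d < y.length)
    (he : ∀ t, t < d → x.getD t 0 = y.getD t 0) (hgt : y.getD d 0 < x.getD d 0) :
    pyLtInt x y = false := by
  induction d generalizing x y with
  | zero =>
    cases x with
    | nil => simp at hx
    | cons a as =>
      cases y with
      | nil => simp at hy
      | cons b bs =>
        simp [List.getD] at hgt
        simp [pyLtInt, hgt, not_lt.mpr (le_of_lt hgt)]
  | succ d ih =>
    cases x with
    | nil => simp at hx
    | cons a as =>
      cases y with
      | nil => simp at hy
      | cons b bs =>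
        have hab : a = b := by simpa [List.getD] using he 0 (by omega)
        subst hab
        simp only [pyLtInt, lt_irrefl, if_false]
        exact ih as bs (by simpa using hx) (by simpa using hy)
          (fun t ht => by simpa [List.getD] using he (t + 1) (by omega))
          (by simpa [List.getD] using hgt)

theorem pyLt_elim (x y : List Int) (h : pyLtInt x y = true) :
    (x.length < y.length ∧ ∀ t, t < x.length → x.getD t 0 = y.getD t 0) ∨
    ∃ d, d < x.length ∧ d < y.length ∧ (∀ t, t < d → x.getD t 0 = y.getD t 0) ∧
      x.getD d 0 < y.getD d 0 := by
  induction x generalizing y with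
  | nil =>
    cases y with
    | nil => simp [pyLtInt] at h
    | cons b bs => exact Or.inl ⟨by simp, fun t ht => by simp at ht⟩
  | cons a as ih =>
    cases y with
    | nil => simp [pyLtInt] at h
    | cons b bs =>
      by_cases hab : a < b
      · exact Or.inr ⟨0, by simp, by simp, fun t ht => by omega, by simpa [List.getD] using hab⟩
      · by_cases hba : b < a
        · simp [pyLtInt, hab, hba] at h
        · have hab' : a = b := le_antisymm (not_lt.mp hba) (not_lt.mp hab)
          subst hab'
          simp only [pyLtInt, lt_irrefl, if_false] at h
          rcases ih bs h with ⟨h1, h2⟩ | ⟨d, h1, h2, h3, h4⟩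
          · refine Or.inl ⟨by simpa using h1, fun t ht => ?_⟩
            cases t with
            | zero => simp [List.getD]
            | succ t => simpa [List.getD] using h2 t (by simpa using ht)
          · refine Or.inr ⟨d + 1, by simpa using h1, by simpa using h2, fun t ht => ?_,
              by simpa [List.getD] using h4⟩
            cases t with
            | zero => simp [List.getD]
            | succ t => simpa [List.getD] using h3 t (by omega)

theorem per_mod (w : List Int) (m j : Nat) (hm : 0 < m) (hper : Per w m j) :
    ∀ t, t < j → w.getD t 0 = w.getD (t % m) 0 := by
  intro t
  induction t using Nat.strong_induction_on with
  | _ t ih =>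
    intro ht
    by_cases hlt : t < m
    · rw [Nat.mod_eq_of_lt hlt]
    · rw [not_lt] at hlt
      rw [hper t hlt ht, ih (t - m) (by omega) (by omega), ← Nat.mod_eq_sub_mod hlt]

theorem duval_key (w : List Int) (m j : Nat) (hm : 1 ≤ m) (hmj : m ≤ j) (hj : j < w.length)
    (hper : Per w m j) (hlyn : Lyn (w.take m))
    (hlt : w.getD (j - m) 0 < w.getD j 0) : Lyn (w.take (j + 1)) := by
  intro s hs1 hsx
  have hlenx : (w.take (j + 1)).length = j + 1 := by rw [List.length_take]; omega
  rw [hlenx] at hsx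
  have hsj : s ≤ j := by omega
  have hx : ∀ t, t ≤ j → (w.take (j + 1)).getD t 0 = w.getD t 0 :=
    fun t ht => gd_take w _ t (by omega)
  have hpm := per_mod w m j (by omega) hper
  set r := s % m with hr
  have hrm : r < m := Nat.mod_lt _ (by omega)
  by_cases hr0 : r = 0
  · -- s is a multiple of the period: the mismatch appears where the appended letter sits
    have hsm : s % m = 0 := by omega
    apply pyLt_intro _ _ (j - s)
    · rw [hlenx]; omega
    · rw [List.length_drop, hlenx]; omega
    · intro t ht
      rw [gd_drop, hx t (by omega), hx (s + t) (by omega),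
        hpm t (by omega), hpm (s + t) (by omega)]
      have hmm : (s + t) % m = t % m := by
        rw [Nat.add_mod, hsm, Nat.zero_add, Nat.mod_mod_of_dvd _ dvd_rfl]
      rw [hmm]
    · rw [gd_drop, show s + (j - s) = j from by omega, hx j le_rfl, hx (j - s) (by omega),
        hpm (j - s) (by omega)]
      have h1 : (j - s) % m = (j - m) % m := by
        have hjm : j % m = (j - s) % m := by
          conv_lhs => rw [show j = (j - s) + s from by omega]
          rw [Nat.add_mod, hsm, Nat.add_zero, Nat.mod_mod_of_dvd _ dvd_rfl]
        rw [← hjm, ← Nat.mod_eq_sub_mod hmj]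
      rw [h1, ← hpm (j - m) (by omega)]
      exact hlt
  · -- s sits strictly inside a period: use the Lyndon property of the root at shift r
    have hul : (w.take m).length = m := by rw [List.length_take]; omega
    have hu := hlyn r (by omega) (by rw [hul]; omega)
    rcases pyLt_elim _ _ hu with ⟨hbad, _⟩ | ⟨d, hd1, hd2, hde, hdlt⟩
    · rw [List.length_drop, hul] at hbad; omega
    · rw [hul] at hd1
      rw [List.length_drop, hul] at hd2
      have hde' : ∀ t, t < d → w.getD t 0 = w.getD (r + t) 0 := by
        intro t ht
        have h0 := hde t ht
        rwa [gd_drop, gd_take w m t (by omega), gd_take w m (r + t) (by omega)] at h0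
      have hdlt' : w.getD d 0 < w.getD (r + d) 0 := by
        have h0 := hdlt
        rwa [gd_drop, gd_take w m d (by omega), gd_take w m (r + d) (by omega)] at h0
      have hmod : ∀ t, t < m - r → (s + t) % m = r + t := by
        intro t ht
        rw [Nat.add_mod, ← hr, Nat.mod_eq_of_lt (show t < m from by omega)]
        exact Nat.mod_eq_of_lt (by omega)
      have hE : ∀ t, t < d → s + t < j →
          (w.take (j + 1)).getD t 0 = ((w.take (j + 1)).drop s).getD t 0 := by
        intro t ht htj
        rw [gd_drop, hx t (by omega), hx (s + t) (by omega), hpm (s + t) htj,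
          hmod t (by omega), ← hde' t ht]
      by_cases hcase : s + d < j
      · apply pyLt_intro _ _ d
        · rw [hlenx]; omega
        · rw [List.length_drop, hlenx]; omega
        · intro t ht; exact hE t ht (by omega)
        · rw [gd_drop, hx d (by omega), hx (s + d) (by omega), hpm (s + d) hcase, hmod d hd2]
          exact hdlt'
      · rw [not_lt] at hcase
        have ht' : j - s ≤ d := by omega
        apply pyLt_intro _ _ (j - s)
        · rw [hlenx]; omega
        · rw [List.length_drop, hlenx]; omega
        · intro t ht; exact hE t (by omega) (by omega)
        · rw [gd_drop, show s + (j - s) = j from by omega, hx j le_rfl, hx (j - s) (by omega)]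
          have hle : w.getD (j - s) 0 ≤ w.getD (r + (j - s)) 0 := by
            rcases lt_or_eq_of_le ht' with h | h
            · exact le_of_eq (hde' _ h)
            · rw [h]; exact le_of_lt hdlt'
          have heq2 : w.getD (r + (j - s)) 0 = w.getD (j - m) 0 := by
            have h2 : (s + (j - s)) % m = r + (j - s) := hmod (j - s) (by omega)
            rw [show s + (j - s) = j from by omega] at h2
            rw [hpm (j - m) (by omega), ← Nat.mod_eq_sub_mod hmj, h2]
          exact lt_of_le_of_lt (le_trans hle (le_of_eq heq2)) hlt

theorem loopA_iff (k : Nat) (w : List Int) (j i : Nat) (hk : w.length - j = k)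
    (hj1 : 1 ≤ j) (hjn : j ≤ w.length) (hij : i < j)
    (hper : Per w (j - i) j) (hlyn : Lyn (w.take (j - i))) :
    (lyndonLoopA w (w.drop j) (i : Int) = true) ↔ Lyn w := by
  induction k generalizing j i with
  | zero =>
    have hjl : j = w.length := by omega
    rw [List.drop_eq_nil_of_le (by omega)]
    by_cases hi0 : i = 0
    · subst hi0
      simp only [lyndonLoopA, Nat.cast_zero, beq_self_eq_true]
      have htake : w.take (j - 0) = w := by
        rw [Nat.sub_zero, hjl, List.take_length]
      rw [htake] at hlyn
      exact ⟨fun _ => hlyn, fun _ => trivial⟩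
    · constructor
      · intro h
        simp only [lyndonLoopA, beq_iff_eq] at h
        omega
      · intro hLyn
        exfalso
        have hm1 : 1 ≤ j - i := by omega
        have h0 := hLyn (j - i) hm1 (by omega)
        have h1 : pyLtInt w (w.drop (j - i)) = false := by
          apply pyLt_false_of_le
          · rw [List.length_drop]; omega
          · intro t ht
            rw [List.length_drop] at ht
            rw [gd_drop]
            have := hper ((j - i) + t) (by omega) (by omega)
            rw [show (j - i) + t - (j - i) = t from by omega] at this
            exact this.symm
        rw [h0] at h1
        simp at h1
  | succ k ih =>
    have hjlt : j < w.length := by omega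
    have hilt : i < w.length := by omega
    rw [List.drop_eq_getElem_cons hjlt]
    simp only [lyndonLoopA, PySem.List.pyGet?_natCast, List.getElem?_eq_getElem hilt]
    have hgdi : w.getD i 0 = w[i] := List.getD_eq_getElem w 0 hilt
    have hgdj : w.getD j 0 = w[j] := List.getD_eq_getElem w 0 hjlt
    by_cases h1 : w[i] < w[j]
    · rw [if_pos h1]
      have hkey : Lyn (w.take (j + 1 - 0)) := by
        rw [Nat.sub_zero]
        refine duval_key w (j - i) j (by omega) (by omega) hjlt hper hlyn ?_
        rw [show j - (j - i) = i from by omega, hgdi, hgdj]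
        exact h1
      have hper0 : Per w (j + 1 - 0) (j + 1) := by intro t ht1 ht2; omega
      have hrec := ih (j + 1) 0 (by omega) (by omega) (by omega) (by omega) hper0 hkey
      simpa using hrec
    · by_cases h2 : w[i] = w[j]
      · rw [if_neg h1, if_pos (beq_iff_eq.mpr h2)]
        have hper' : Per w (j + 1 - (i + 1)) (j + 1) := by
          intro t ht1 ht2
          rw [show j + 1 - (i + 1) = j - i from by omega] at ht1 ⊢
          rcases Nat.lt_or_ge t j with h | h
          · exact hper t ht1 h
          · have htj : t = j := by omega
            rw [htj, show j - (j - i) = i from by omega, hgdi, hgdj]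
            exact h2.symm
        have hlyn' : Lyn (w.take (j + 1 - (i + 1))) := by
          rw [show j + 1 - (i + 1) = j - i from by omega]; exact hlyn
        have hrec := ih (j + 1) (i + 1) (by omega) (by omega) (by omega) (by omega) hper' hlyn'
        have hcast : ((i : Int) + 1) = ((i + 1 : Nat) : Int) := by push_cast; ring
        rw [hcast]
        exact hrec
      · rw [if_neg h1, if_neg (by simpa [beq_iff_eq] using h2)]
        constructor
        · intro h; exact absurd h (by simp)
        · intro hLyn
          exfalso
          have hgt : w[j] < w[i] := by
            rcases lt_trichotomy (w[i]) (w[j]) with h | h | h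
            · exact absurd h h1
            · exact absurd h h2
            · exact h
          have h0 := hLyn (j - i) (by omega) (by omega)
          have hf : pyLtInt w (w.drop (j - i)) = false := by
            apply pyLt_false_of_gt _ _ i hilt
            · rw [List.length_drop]; omega
            · intro t ht
              rw [gd_drop]
              have := hper ((j - i) + t) (by omega) (by omega)
              rw [show (j - i) + t - (j - i) = t from by omega] at this
              exact this.symm
            · rw [gd_drop, show (j - i) + i = j from by omega, hgdi, hgdj]
              exact hgt
          rw [h0] at hf
          simp at hf

theorem isA_iff (w : List Int) : is_lyndon w = true ↔ Lyn w := by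
  cases w with
  | nil =>
    constructor
    · intro _ s hs1 hs2; simp at hs2
    · intro _; decide
  | cons a as =>
    have hper : Per (a :: as) 1 1 := by intro t ht1 ht2; omega
    have hlyn : Lyn ((a :: as).take 1) := by
      intro s hs1 hs2
      rw [List.length_take] at hs2
      omega
    have h := loopA_iff ((a :: as).length - 1) (a :: as) 1 0 rfl (by omega) (by simp)
      (by omega) hper hlyn
    unfold is_lyndon
    rw [PySem.List.slice_from_one, ← List.drop_one]
    exact h

theorem altLoopB_iff (w : List Int) (l : List Int) :
    altLoopB w l = true ↔
      ∀ i ∈ l, pyLtInt w (PySem.List.slice w (some i) none) = true := by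
  induction l with
  | nil => simp [altLoopB]
  | cons i rest ih =>
    by_cases h : pyLtInt w (PySem.List.slice w (some i) none) = true
    · simp [altLoopB, h, ih]
    · simp [altLoopB, h]

theorem isB_iff (w : List Int) : is_lyndon_alt w = true ↔ Lyn w := by
  unfold is_lyndon_alt
  rw [altLoopB_iff]
  constructor
  · intro h s hs1 hs2
    have hmem : ((s : Int)) ∈ PySem.List.pyRange 1 (w.length : Int) 1 := by
      rw [PySem.List.mem_pyRange_one]
      constructor <;> omega
    have h0 := h _ hmem
    rwa [PySem.List.slice_from_natCast] at h0
  · intro h i hi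
    rw [PySem.List.mem_pyRange_one] at hi
    obtain ⟨hi1, hi2⟩ := hi
    have hieq : i = ((i.toNat : Nat) : Int) := by omega
    rw [hieq, PySem.List.slice_from_natCast]
    exact h i.toNat (by omega) (by omega)

-- ===== VERDICT (by name: the statement is the Claim_ definition above) =====
theorem is_lyndon_spec : Claim_equal_is_lyndon := by
  intro w _
  unfold Spec_is_lyndon
  have h := (isA_iff w).trans (isB_iff w).symm
  cases hA : is_lyndon w <;> cases hB : is_lyndon_alt w <;> simp_all
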